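-- pv_equiv track=rewrite | github.com/fanzhangg/24-Points | Game.py | arrange_nums
-- ===== SOURCE A (Python) =====
-- def arrange_nums(a, b, c, d):
--     result = []
--     for x in [a, b, c, d]:
--         re = str(x)
--         li = [a, b, c, d]
--         li.remove(x)
--         for y in li:
--             re += str(y)
--             li.remove(y)
--             for z in li:
--                 re += str(z)
--                 li.remove(z)
--                 for m in li:
--                     re += str(m)
--                     result.append(re)
--     return result
-- ===== SOURCE B (Python) =====
-- def arrange_nums(a, b, c, d):
--     # Each pass of A's mutating nested loops collapses to: str(x) followed by
--     # the other three numbers in original order (first occurrence of x removed).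
--     nums = [a, b, c, d]
--     result = []
--     for x in nums:
--         rest = nums.copy()
--         rest.remove(x)
--         result.append(str(x) + ''.join(str(n) for n in rest))
--     return result
-- ===== Notes on version B (the rewrite author's own statement) =====
-- stated objective: simpler
-- what changed: Replaces the three nested loops that mutate the list being iterated (so each inner loop only ever sees its first remaining element) with a single pass that, for each x, removes the first occurrence of x and concatenates the rest in order.
import Mathlib
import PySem

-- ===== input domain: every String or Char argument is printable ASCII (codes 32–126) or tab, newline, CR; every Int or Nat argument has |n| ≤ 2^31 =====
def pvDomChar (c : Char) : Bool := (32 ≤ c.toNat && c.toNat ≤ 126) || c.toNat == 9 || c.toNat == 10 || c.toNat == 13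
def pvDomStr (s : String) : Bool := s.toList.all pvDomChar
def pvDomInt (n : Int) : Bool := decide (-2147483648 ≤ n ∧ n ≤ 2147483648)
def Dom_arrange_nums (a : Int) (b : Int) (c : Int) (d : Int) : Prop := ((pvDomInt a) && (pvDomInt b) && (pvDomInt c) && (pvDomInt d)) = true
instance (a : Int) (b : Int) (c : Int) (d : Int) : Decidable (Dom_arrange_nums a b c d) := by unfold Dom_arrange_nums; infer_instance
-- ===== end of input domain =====

-- B collapses A's three nested mutating loops into one pass per element; return value equivalence, objective: simpler.

-- ===== PORT A =====
-- Python's `for y in li` with `li.remove(y)` inside advances an internal index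
-- over the shrinking list: modelled by an index i read with List.get?, with
-- fuel (4 is enough: li never exceeds 3 elements) making the recursion total.
-- innermost `for m in li:` loop (no mutation): state is (re, result)
def pvMLoop (li : List Int) (re : String) (result : List String) : String × List String :=
  li.foldl (fun st m => ((st.1 ++ PySem.Int.toStr m), st.2 ++ [st.1 ++ PySem.Int.toStr m])) (re, result)

-- `for z in li:` with li.remove(z); remove? always succeeds here (z taken from li)
def pvZLoop : Nat → List Int → Nat → String → List String → String × List Int × List String
  | 0, li, _, re, result => (re, li, result)
  | fuel+1, li, i, re, result =>
    match li[i]? with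
    | none => (re, li, result)
    | some z =>
      let re' := re ++ PySem.Int.toStr z
      let li' := (PySem.List.remove? li z).getD li
      let st := pvMLoop li' re' result
      pvZLoop fuel li' (i+1) st.1 st.2

-- `for y in li:` with li.remove(y)
def pvYLoop : Nat → List Int → Nat → String → List String → String × List Int × List String
  | 0, li, _, re, result => (re, li, result)
  | fuel+1, li, i, re, result =>
    match li[i]? with
    | none => (re, li, result)
    | some y =>
      let re' := re ++ PySem.Int.toStr y
      let li' := (PySem.List.remove? li y).getD li
      let st := pvZLoop 4 li' 0 re' result
      pvYLoop fuel st.2.1 (i+1) st.1 st.2.2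

def arrange_nums (a : Int) (b : Int) (c : Int) (d : Int) : List String :=
  [a, b, c, d].foldl (fun result x =>
    (pvYLoop 4 ((PySem.List.remove? [a, b, c, d] x).getD [a, b, c, d]) 0
      (PySem.Int.toStr x) result).2.2) []

-- ===== PORT B =====
def arrange_nums_alt (a : Int) (b : Int) (c : Int) (d : Int) : List String :=
  [a, b, c, d].foldl (fun out x =>
    out ++ [PySem.Int.toStr x ++
      PySem.Str.join "" (((PySem.List.remove? [a, b, c, d] x).getD [a, b, c, d]).map PySem.Int.toStr)]) []

-- ===== PRECONDITION & SPEC =====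
def Spec_arrange_nums (a : Int) (b : Int) (c : Int) (d : Int) (out : List String) : Prop := out = arrange_nums_alt a b c d
instance (a : Int) (b : Int) (c : Int) (d : Int) (out : List String) : Decidable (Spec_arrange_nums a b c d out) := by unfold Spec_arrange_nums; infer_instance

-- ===== CLAIM (what is proved, stated in full; the proofs are below) =====
def Claim_equal_arrange_nums : Prop := ∀ (a : Int) (b : Int) (c : Int) (d : Int), Dom_arrange_nums a b c d → Spec_arrange_nums a b c d (arrange_nums a b c d)

-- ===== LEMMAS AND PROOFS =====

-- one outer iteration of A on a 3-element remainder yields exactly B's string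
theorem pv_body_eq (x : Int) (rest : List Int) (h : rest.length = 3) (res : List String) :
    (pvYLoop 4 rest 0 (PySem.Int.toStr x) res).2.2
      = res ++ [PySem.Int.toStr x ++ PySem.Str.join "" (rest.map PySem.Int.toStr)] := by
  match rest, h with
  | [p, q, r], _ =>
    simp [pvYLoop, pvZLoop, pvMLoop, PySem.Str.join, PySem.Chars.join, String.append_assoc]
    rw [← String.toList_inj]
    simp [List.intercalate, PySem.Int.toList_toStr]

theorem pv_rest_len (a b c d x : Int) (hx : x ∈ [a, b, c, d]) :
    ((PySem.List.remove? [a, b, c, d] x).getD [a, b, c, d]).length = 3 := by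
  simp [PySem.List.remove?_eq_some_erase [a, b, c, d] x hx, List.length_erase_of_mem hx]

-- ===== VERDICT (by name: the statement is the Claim_ definition above) =====
theorem arrange_nums_spec : Claim_equal_arrange_nums := by
  intro a b c d _
  unfold Spec_arrange_nums arrange_nums arrange_nums_alt
  simp only [List.foldl]
  rw [pv_body_eq _ _ (pv_rest_len a b c d a (by simp)),
      pv_body_eq _ _ (pv_rest_len a b c d b (by simp)),
      pv_body_eq _ _ (pv_rest_len a b c d c (by simp)),
      pv_body_eq _ _ (pv_rest_len a b c d d (by simp))]
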